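-- pv_equiv track=rewrite | github.com/ugnom/atcoder_archive | agc/agc038/a.py | composeM
-- ===== SOURCE A (Python) =====
-- def composeM(h,w,a,b):
--     ans = [[0]*w for i in range(h)]
--
--     if a != 0 and b != 0:
--         stt = 0
--         for hi in range(h):
--             for i in range(stt,stt+a):
--                 ans[hi][i%w] = 1
--             stt += a
--             stt %= w
--     elif a == 0 and b != 0:
--         for i in range(b):
--             ans[i] = [1]*w
--     elif a != 0 and b == 0:
--         for i in range(a):
--             for j in range(h):
--                 ans[j][i] = 1
--     return ans
-- ===== SOURCE B (Python) =====
-- def composeM(h, w, a, b):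
--     # Closed-form per-cell predicate instead of painting runs with a running start.
--     if a != 0 and b != 0:
--         f = lambda hi, col: (col - hi * a) % w < a
--     elif a == 0 and b != 0:
--         f = lambda hi, col: hi < b
--     elif a != 0 and b == 0:
--         f = lambda hi, col: col < a
--     else:
--         f = lambda hi, col: False
--     return [[1 if f(hi, col) else 0 for col in range(w)] for hi in range(h)]
-- ===== Notes on version B (the rewrite author's own statement) =====
-- stated objective: alternative
-- what changed: B builds each cell directly from a closed-form predicate ((col - hi*a) % w < a, hi < b, or col < a) over a pure nested comprehension, instead of allocating a zero grid and imperatively painting contiguous a-length runs with a threaded running start stt.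
import Mathlib
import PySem

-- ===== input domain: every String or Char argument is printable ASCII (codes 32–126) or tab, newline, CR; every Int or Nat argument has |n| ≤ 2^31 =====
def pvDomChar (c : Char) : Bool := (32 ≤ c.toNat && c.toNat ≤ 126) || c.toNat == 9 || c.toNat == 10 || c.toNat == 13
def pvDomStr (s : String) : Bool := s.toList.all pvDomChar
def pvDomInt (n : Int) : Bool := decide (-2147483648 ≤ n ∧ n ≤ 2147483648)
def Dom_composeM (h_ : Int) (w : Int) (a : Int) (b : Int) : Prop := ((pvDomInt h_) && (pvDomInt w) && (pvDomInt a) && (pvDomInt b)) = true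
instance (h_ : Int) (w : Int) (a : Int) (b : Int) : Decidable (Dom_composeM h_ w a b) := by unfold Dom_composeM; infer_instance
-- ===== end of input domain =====

-- B replaces A's run-painting loop (threaded start stt) by a closed-form per-cell predicate; equal wherever A returns (Pre_).

-- ===== PORT A =====
-- ans[hi][i] = v : read row hi, set cell i, write the row back (exact for the in-range indices reached inside Pre_)
def setCell (ans : List (List Int)) (hi : Int) (i : Int) (v : Int) : List (List Int) :=
  PySem.List.pySetD ans hi (PySem.List.pySetD (PySem.List.pyGetD ans hi []) i v)

def composeM (h_ : Int) (w : Int) (a : Int) (b : Int) : List (List Int) :=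
  let ans := (PySem.List.pyRange 0 h_ 1).map (fun _ => (PySem.List.pyRange 0 w 1).map (fun _ => (0:Int)))
  if a ≠ 0 ∧ b ≠ 0 then
    ((PySem.List.pyRange 0 h_ 1).foldl
      (fun (st : List (List Int) × Int) hi =>
        ((PySem.List.pyRange st.2 (st.2 + a) 1).foldl
            (fun ans i => setCell ans hi (PySem.Int.mod i w) 1) st.1,
         PySem.Int.mod (st.2 + a) w))
      (ans, 0)).1
  else if a = 0 ∧ b ≠ 0 then
    (PySem.List.pyRange 0 b 1).foldl
      (fun ans i => PySem.List.pySetD ans i ((PySem.List.pyRange 0 w 1).map (fun _ => (1:Int)))) ans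
  else if a ≠ 0 ∧ b = 0 then
    (PySem.List.pyRange 0 a 1).foldl
      (fun ans i => (PySem.List.pyRange 0 h_ 1).foldl (fun ans j => setCell ans j i 1) ans) ans
  else ans

-- ===== PORT B =====
def composeM_alt (h_ : Int) (w : Int) (a : Int) (b : Int) : List (List Int) :=
  let f : Int → Int → Bool :=
    if a ≠ 0 ∧ b ≠ 0 then fun hi col => decide (PySem.Int.mod (col - hi * a) w < a)
    else if a = 0 ∧ b ≠ 0 then fun hi _ => decide (hi < b)
    else if a ≠ 0 ∧ b = 0 then fun _ col => decide (col < a)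
    else fun _ _ => false
  (PySem.List.pyRange 0 h_ 1).map (fun hi =>
    (PySem.List.pyRange 0 w 1).map (fun col => if f hi col then (1:Int) else 0))

-- ===== PRECONDITION & SPEC =====
-- Pre_ holds exactly where Python A returns; its complement is exactly where A raises
-- (ZeroDivisionError for w = 0 with a run to paint, IndexError when a run/row/column index leaves the h×w grid).
def Pre_composeM (h_ : Int) (w : Int) (a : Int) (b : Int) : Prop :=
  (a ≠ 0 ∧ b ≠ 0 → h_ ≤ 0 ∨ 0 < w ∨ (w < 0 ∧ a < 0)) ∧
  (a = 0 ∧ b ≠ 0 → b < 0 ∨ b ≤ h_) ∧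
  (a ≠ 0 ∧ b = 0 → a < 0 ∨ h_ ≤ 0 ∨ a ≤ w)
instance (h_ : Int) (w : Int) (a : Int) (b : Int) : Decidable (Pre_composeM h_ w a b) := by unfold Pre_composeM; infer_instance
def pvWitness_composeM : Int × Int × Int × Int := (3, 4, 2, 2)

def Spec_composeM (h_ : Int) (w : Int) (a : Int) (b : Int) (out : List (List Int)) : Prop := out = composeM_alt h_ w a b
instance (h_ : Int) (w : Int) (a : Int) (b : Int) (out : List (List Int)) : Decidable (Spec_composeM h_ w a b out) := by unfold Spec_composeM; infer_instance

-- ===== CLAIM (what is proved, stated in full; the proofs are below) =====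
def Claim_equal_composeM : Prop := ∀ (h_ : Int) (w : Int) (a : Int) (b : Int), Dom_composeM h_ w a b → Pre_composeM h_ w a b → Spec_composeM h_ w a b (composeM h_ w a b)

-- ===== LEMMAS AND PROOFS =====

def paintR (is : List Int) (row : List Int) : List Int :=
  is.foldl (fun r i => PySem.List.pySetD r i 1) row

theorem sameRow (is : List Int) (hi : Int) (hhi0 : 0 ≤ hi) :
    ∀ ans : List (List Int), hi < (ans.length : Int) →
    is.foldl (fun ans i => setCell ans hi i 1) ans
      = PySem.List.pySetD ans hi (paintR is (PySem.List.pyGetD ans hi [])) := by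
  induction is with
  | nil =>
    intro ans hlt
    obtain ⟨n, rfl⟩ : ∃ n : Nat, hi = (n : Int) := ⟨hi.toNat, (Int.toNat_of_nonneg hhi0).symm⟩
    simp only [List.foldl_nil, paintR, PySem.List.pySetD_natCast, PySem.List.pyGetD_natCast]
    rw [List.getD_eq_getElem ans [] (by exact_mod_cast hlt)]
    exact (List.set_getElem_self ..).symm
  | cons i t ih =>
    intro ans hlt
    obtain ⟨n, rfl⟩ : ∃ n : Nat, hi = (n : Int) := ⟨hi.toNat, (Int.toNat_of_nonneg hhi0).symm⟩
    have hn : n < ans.length := by exact_mod_cast hlt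
    simp only [List.foldl_cons]
    rw [ih (setCell ans (n : Int) i 1) (by simp [setCell, PySem.List.length_pySetD]; exact_mod_cast hlt)]
    simp only [setCell, PySem.List.pySetD_natCast, PySem.List.pyGetD_natCast]
    rw [List.getD_eq_getElem ans [] hn]
    rw [List.getD_eq_getElem _ [] (by simpa using hn)]
    rw [List.getElem_set_self]
    rw [List.set_set]
    simp [paintR]
theorem memWrap (w stt a j : Int) (hw : 0 < w) (hj0 : 0 ≤ j) (hjw : j < w) :
    (j ∈ (PySem.List.pyRange stt (stt + a) 1).map (fun i => PySem.Int.mod i w))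
      ↔ PySem.Int.mod (j - stt) w < a := by
  simp only [List.mem_map, PySem.List.mem_pyRange_one, PySem.Int.mod_eq_emod_of_pos hw]
  constructor
  · rintro ⟨i, ⟨h1, h2⟩, h3⟩
    have hd0 : 0 ≤ i - stt := by omega
    have heq : (j - stt) % w = (i - stt) % w := by
      conv_lhs => rw [← h3]
      rw [Int.sub_emod, Int.sub_emod i stt, Int.emod_emod_of_dvd _ (dvd_refl w)]
    have hle : (i - stt) % w ≤ i - stt := by
      have h4 := Int.emod_def (i - stt) w
      have h5 : 0 ≤ (i - stt) / w := Int.ediv_nonneg hd0 hw.le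
      have h6 : 0 ≤ w * ((i - stt) / w) := mul_nonneg hw.le h5
      omega
    omega
  · intro hr
    have hr0 : 0 ≤ (j - stt) % w := Int.emod_nonneg _ (by omega)
    refine ⟨stt + (j - stt) % w, ⟨by omega, by omega⟩, ?_⟩
    rw [Int.add_emod, Int.emod_emod_of_dvd _ (dvd_refl w), ← Int.add_emod]
    have : stt + (j - stt) = j := by ring
    rw [this, Int.emod_eq_of_lt hj0 hjw]
theorem paintR_length (is : List Int) (row : List Int) : (paintR is row).length = row.length := by
  induction is generalizing row with
  | nil => rfl
  | cons i t ih => simp [paintR, List.foldl_cons] at *; rw [ih]; simp [PySem.List.length_pySetD]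

theorem paintR_getElem (is : List Int) (row : List Int)
    (hbd : ∀ i ∈ is, 0 ≤ i ∧ i < (row.length : Int)) (j : Nat) (hj : j < row.length) :
    (paintR is row)[j]'(by rw [paintR_length]; exact hj) =
      if (j : Int) ∈ is then 1 else row[j] := by
  induction is generalizing row with
  | nil => simp [paintR]
  | cons i t ih =>
    obtain ⟨hi0, hilen⟩ := hbd i (List.mem_cons_self ..)
    have hset : PySem.List.pySetD row i (1:Int) = row.set i.toNat 1 :=
      PySem.List.pySetD_of_nonneg row 1 hi0
    have hlen' : (row.set i.toNat (1:Int)).length = row.length := by simp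
    have hbd' : ∀ x ∈ t, 0 ≤ x ∧ x < ((row.set i.toNat (1:Int)).length : Int) := by
      intro x hx; rw [hlen']; exact hbd x (List.mem_cons_of_mem _ hx)
    have := ih (row.set i.toNat 1) hbd' (by omega : j < (row.set i.toNat (1:Int)).length)
    simp only [paintR, List.foldl_cons, hset] at *
    rw [this]
    by_cases hjt : (j : Int) ∈ t
    · simp [hjt]
    · have hgs : (row.set i.toNat (1:Int))[j]'(by omega) = if i.toNat = j then 1 else row[j] := by
        rw [List.getElem_set]
      rw [hgs]
      by_cases hij : (j : Int) = i
      · have : i.toNat = j := by omega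
        simp [this, hij]
      · have : ¬ i.toNat = j := by omega
        simp [this, hij, hjt]
def rowsF (g : Int → List Int → List Int) (ks : List Int) (ans : List (List Int)) : List (List Int) :=
  ks.foldl (fun ans k => PySem.List.pySetD ans k (g k (PySem.List.pyGetD ans k []))) ans

theorem rowsF_length (g : Int → List Int → List Int) (ks : List Int) (ans : List (List Int)) :
    (rowsF g ks ans).length = ans.length := by
  induction ks generalizing ans with
  | nil => rfl
  | cons k t ih => simp [rowsF, List.foldl_cons] at *; rw [ih]; simp [PySem.List.length_pySetD]

theorem rowsF_append (g : Int → List Int → List Int) (ks ls : List Int) (ans : List (List Int)) :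
    rowsF g (ks ++ ls) ans = rowsF g ls (rowsF g ks ans) := by
  simp [rowsF, List.foldl_append]

theorem rowsF_range? (g : Int → List Int → List Int) (m : Nat) (ans : List (List Int))
    (hm : m ≤ ans.length) (k : Nat) (hk : k < ans.length) :
    (rowsF g (PySem.List.pyRange 0 (m : Int) 1) ans)[k]? =
      some (if k < m then g (k : Int) (ans[k]'hk) else ans[k]'hk) := by
  induction m generalizing k hk with
  | zero =>
    simp only [Nat.cast_zero]
    rw [PySem.List.pyRange_one_eq_nil (le_refl 0)]
    simp [rowsF, List.getElem?_eq_getElem hk]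
  | succ m ih =>
    have hsplit : PySem.List.pyRange 0 ((m+1 : Nat) : Int) 1
        = PySem.List.pyRange 0 (m : Int) 1 ++ [(m : Int)] := by
      have h1 : ((m+1 : Nat) : Int) = (m : Int) + 1 := by push_cast; ring
      rw [h1, PySem.List.pyRange_one_succ_right (by positivity)]
    rw [hsplit, rowsF_append]
    have hm' : m ≤ ans.length := by omega
    set F := rowsF g (PySem.List.pyRange 0 (m : Int) 1) ans with hF
    have hFlen : F.length = ans.length := rowsF_length ..
    have hFm : F[m]? = some (ans[m]'(by omega)) := by
      rw [ih hm' m (by omega)]; simp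
    have hFmget : F[m]'(by omega) = ans[m]'(by omega) := by
      rw [List.getElem?_eq_getElem (by omega : m < F.length)] at hFm
      exact Option.some.inj hFm
    have hget : PySem.List.pyGetD F (m : Int) [] = ans[m]'(by omega) := by
      rw [PySem.List.pyGetD_natCast]
      rw [List.getD_eq_getElem F [] (by omega : m < F.length)]
      exact hFmget
    show (rowsF g [(m:Int)] F)[k]? = _
    simp only [rowsF, List.foldl_cons, List.foldl_nil, hget, PySem.List.pySetD_natCast]
    rw [List.getElem?_set]
    by_cases hkm : m = k
    · subst hkm
      simp [show m < F.length by omega]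
    · rw [if_neg hkm, ih hm' k hk]
      by_cases h1 : k < m
      · rw [if_pos h1, if_pos (by omega)]
      · rw [if_neg h1, if_neg (by omega)]

theorem rowsF_range (g : Int → List Int → List Int) (m : Nat) (ans : List (List Int))
    (hm : m ≤ ans.length) (k : Nat) (hk : k < ans.length) :
    (rowsF g (PySem.List.pyRange 0 (m : Int) 1) ans)[k]'(by rw [rowsF_length]; exact hk) =
      if k < m then g (k : Int) (ans[k]'hk) else ans[k]'hk := by
  have h := rowsF_range? g m ans hm k hk
  rw [List.getElem?_eq_getElem (by rw [rowsF_length]; exact hk :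
    k < (rowsF g (PySem.List.pyRange 0 (m : Int) 1) ans).length)] at h
  exact Option.some.inj h
theorem modStep (w a x : Int) (hw : 0 < w) :
    PySem.Int.mod (PySem.Int.mod x w + a) w = PySem.Int.mod (x + a) w := by
  simp only [PySem.Int.mod_eq_emod_of_pos hw]
  rw [Int.add_emod, Int.emod_emod_of_dvd _ (dvd_refl w), ← Int.add_emod]

theorem modShift (w x j : Int) (hw : 0 < w) :
    PySem.Int.mod (j - PySem.Int.mod x w) w = PySem.Int.mod (j - x) w := by
  simp only [PySem.Int.mod_eq_emod_of_pos hw]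
  rw [Int.sub_emod, Int.emod_emod_of_dvd _ (dvd_refl w), ← Int.sub_emod]

theorem pyRangeToNat (h_ : Int) :
    PySem.List.pyRange 0 h_ 1 = PySem.List.pyRange 0 ((h_.toNat : Nat) : Int) 1 := by
  by_cases h : 0 ≤ h_
  · rw [Int.toNat_of_nonneg h]
  · rw [PySem.List.pyRange_one_eq_nil (by omega),
        PySem.List.pyRange_one_eq_nil (by simp; omega)]

theorem pairFold (w a : Int) (hw : 0 < w) (m : Nat) (ans : List (List Int)) (hm : m ≤ ans.length) :
    (PySem.List.pyRange 0 (m : Int) 1).foldl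
      (fun (st : List (List Int) × Int) hi =>
        ((PySem.List.pyRange st.2 (st.2 + a) 1).foldl
            (fun ans i => setCell ans hi (PySem.Int.mod i w) 1) st.1,
         PySem.Int.mod (st.2 + a) w))
      (ans, 0)
    = (rowsF (fun k row => paintR
          ((PySem.List.pyRange (PySem.Int.mod (k*a) w) (PySem.Int.mod (k*a) w + a) 1).map
            (fun i => PySem.Int.mod i w)) row)
        (PySem.List.pyRange 0 (m : Int) 1) ans,
       PySem.Int.mod ((m : Int) * a) w) := by
  induction m with
  | zero =>
    simp only [Nat.cast_zero]
    rw [PySem.List.pyRange_one_eq_nil (le_refl 0)]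
    simp [rowsF, PySem.Int.mod_eq_emod_of_pos hw]
  | succ m ih =>
    have hsplit : PySem.List.pyRange 0 ((m+1 : Nat) : Int) 1
        = PySem.List.pyRange 0 (m : Int) 1 ++ [(m : Int)] := by
      have h1 : ((m+1 : Nat) : Int) = (m : Int) + 1 := by push_cast; ring
      rw [h1, PySem.List.pyRange_one_succ_right (by positivity)]
    rw [hsplit, List.foldl_append, rowsF_append, ih (by omega)]
    simp only [List.foldl_cons, List.foldl_nil]
    set s := PySem.Int.mod ((m : Int) * a) w with hs
    set F := rowsF (fun k row => paintR
          ((PySem.List.pyRange (PySem.Int.mod (k*a) w) (PySem.Int.mod (k*a) w + a) 1).map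
            (fun i => PySem.Int.mod i w)) row)
        (PySem.List.pyRange 0 (m : Int) 1) ans with hF
    have hFlen : F.length = ans.length := rowsF_length ..
    have hfirst : (PySem.List.pyRange s (s + a) 1).foldl
          (fun ans i => setCell ans (m : Int) (PySem.Int.mod i w) 1) F
        = rowsF (fun k row => paintR
            ((PySem.List.pyRange (PySem.Int.mod (k*a) w) (PySem.Int.mod (k*a) w + a) 1).map
              (fun i => PySem.Int.mod i w)) row) [(m : Int)] F := by
      have hmap : (PySem.List.pyRange s (s + a) 1).foldl
            (fun ans i => setCell ans (m : Int) (PySem.Int.mod i w) 1) F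
          = ((PySem.List.pyRange s (s + a) 1).map (fun i => PySem.Int.mod i w)).foldl
            (fun ans i => setCell ans (m : Int) i 1) F := by
        rw [List.foldl_map]
      rw [hmap, sameRow _ (m : Int) (by positivity) F (by rw [hFlen]; exact_mod_cast by omega)]
      rfl
    rw [hfirst]
    have hsecond : PySem.Int.mod (s + a) w = PySem.Int.mod (((m+1 : Nat) : Int) * a) w := by
      rw [hs, modStep _ _ _ hw]
      congr 1
      push_cast; ring
    rw [hsecond]

theorem foldl_self {α β : Type} (L : List α) (init : β) :
    L.foldl (fun x _ => x) init = init := by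
  induction L generalizing init with
  | nil => rfl
  | cons x t ih => simpa using ih init


theorem case1_main (h_ w a : Int) (hw : 0 < w) :
    ((PySem.List.pyRange 0 h_ 1).foldl
      (fun (st : List (List Int) × Int) hi =>
        ((PySem.List.pyRange st.2 (st.2 + a) 1).foldl
            (fun ans i => setCell ans hi (PySem.Int.mod i w) 1) st.1,
         PySem.Int.mod (st.2 + a) w))
      ((PySem.List.pyRange 0 h_ 1).map (fun _ => (PySem.List.pyRange 0 w 1).map (fun _ => (0:Int))), 0)).1
    = (PySem.List.pyRange 0 h_ 1).map (fun hi =>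
        (PySem.List.pyRange 0 w 1).map (fun col =>
          if decide (PySem.Int.mod (col - hi * a) w < a) then (1:Int) else 0)) := by
  rw [pyRangeToNat h_]
  have hlen0 : ((PySem.List.pyRange 0 ((h_.toNat : Nat) : Int) 1).map
      (fun _ => (PySem.List.pyRange 0 w 1).map (fun _ => (0:Int)))).length = h_.toNat := by
    simp [PySem.List.length_pyRange_one]; omega
  rw [pairFold w a hw h_.toNat _ (by omega)]
  apply List.ext_getElem
  · rw [rowsF_length, hlen0]
    simp [PySem.List.length_pyRange_one]; omega
  · intro k hk1 hk2
    have hkm : k < h_.toNat := by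
      simp [PySem.List.length_pyRange_one] at hk2; omega
    rw [rowsF_range _ h_.toNat _ (by omega) k (by omega), if_pos hkm]
    rw [List.getElem_map, List.getElem_map, PySem.List.getElem_pyRange_one]
    -- row-level equality
    apply List.ext_getElem
    · rw [paintR_length]; simp
    · intro j hj1 hj2
      have hjw : (j : Int) < w := by
        rw [paintR_length] at hj1
        simp [PySem.List.length_pyRange_one] at hj1
        omega
      rw [paintR_getElem _ _ ?hbd j (by rw [paintR_length] at hj1; exact hj1)]
      case hbd =>
        intro x hx
        simp only [List.mem_map] at hx
        obtain ⟨i, _, rfl⟩ := hx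
        refine ⟨PySem.Int.mod_nonneg _ hw, ?_⟩
        have := PySem.Int.mod_lt i hw
        rw [paintR_length] at hj1
        simp [PySem.List.length_pyRange_one]
        omega
      rw [List.getElem_map, List.getElem_map, PySem.List.getElem_pyRange_one]
      have hmem := memWrap w (PySem.Int.mod ((k:Int)*a) w) a (j:Int) hw (by positivity) hjw
      have hcond : (0 + (j:Int)) - (0 + (k:Int)) * a = (j:Int) - (k:Int)*a := by ring
      by_cases hin : (j:Int) ∈ (PySem.List.pyRange (PySem.Int.mod ((k:Int)*a) w) (PySem.Int.mod ((k:Int)*a) w + a) 1).map (fun i => PySem.Int.mod i w)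
      · rw [if_pos hin]
        have h5 := hmem.mp hin
        rw [modShift w ((k:Int)*a) (j:Int) hw] at h5
        simp only [hcond]
        rw [if_pos (by simpa using h5)]
      · rw [if_neg hin]
        have h5 := hmem.not.mp hin
        rw [modShift w ((k:Int)*a) (j:Int) hw] at h5
        simp only [hcond]
        rw [if_neg (by simpa using h5)]

theorem colsFold (h_ : Int) (hh : 0 < h_) (is : List Int) :
    ∀ ans : List (List Int), ans.length = h_.toNat →
    (is.foldl (fun ans i =>
        (PySem.List.pyRange 0 h_ 1).foldl (fun ans j => setCell ans j i 1) ans) ans).length = ans.length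
    ∧ ∀ (k : Nat) (hk : k < ans.length),
      (is.foldl (fun ans i =>
        (PySem.List.pyRange 0 h_ 1).foldl (fun ans j => setCell ans j i 1) ans) ans)[k]?
        = some (paintR is (ans[k]'hk)) := by
  induction is with
  | nil =>
    intro ans hlen
    refine ⟨rfl, ?_⟩
    intro k hk
    simp [paintR, List.getElem?_eq_getElem hk]
  | cons i t ih =>
    intro ans hlen
    have hstep : (PySem.List.pyRange 0 h_ 1).foldl (fun ans j => setCell ans j i 1) ans
        = rowsF (fun _ row => PySem.List.pySetD row i 1) (PySem.List.pyRange 0 h_ 1) ans := rfl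
    have hrange : PySem.List.pyRange 0 h_ 1 = PySem.List.pyRange 0 ((h_.toNat : Nat) : Int) 1 :=
      pyRangeToNat h_
    simp only [List.foldl_cons, hstep]
    set F := rowsF (fun _ row => PySem.List.pySetD row i 1) (PySem.List.pyRange 0 h_ 1) ans with hF
    have hlenF : F.length = ans.length := by rw [hF]; exact rowsF_length ..
    have hgetF : ∀ (k : Nat) (hk : k < ans.length), F[k]? = some (PySem.List.pySetD (ans[k]'hk) i 1) := by
      intro k hk
      rw [hF, hrange, rowsF_range? _ h_.toNat ans (by omega) k hk, if_pos (by omega)]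
    obtain ⟨ihlen, ihget⟩ := ih F (by omega)
    refine ⟨by rw [ihlen, hlenF], ?_⟩
    intro k hk
    rw [ihget k (by omega)]
    congr 1
    have h1 : F[k]? = some (PySem.List.pySetD (ans[k]'hk) i 1) := hgetF k hk
    have h2 : F[k]'(by omega : k < F.length) = PySem.List.pySetD (ans[k]'hk) i 1 := by
      rw [List.getElem?_eq_getElem (by omega : k < F.length)] at h1
      exact Option.some.inj h1
    rw [h2]
    rfl


theorem case1_noop (h_ w a : Int) (ha : a < 0) (ans0 : List (List Int)) :
    ((PySem.List.pyRange 0 h_ 1).foldl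
      (fun (st : List (List Int) × Int) hi =>
        ((PySem.List.pyRange st.2 (st.2 + a) 1).foldl
            (fun ans i => setCell ans hi (PySem.Int.mod i w) 1) st.1,
         PySem.Int.mod (st.2 + a) w))
      (ans0, 0)).1 = ans0 := by
  suffices h : ∀ (L : List Int) (st : List (List Int) × Int),
      (L.foldl (fun (st : List (List Int) × Int) hi =>
        ((PySem.List.pyRange st.2 (st.2 + a) 1).foldl
            (fun ans i => setCell ans hi (PySem.Int.mod i w) 1) st.1,
         PySem.Int.mod (st.2 + a) w)) st).1 = st.1 by
    exact h _ _
  intro L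
  induction L with
  | nil => intro st; rfl
  | cons x t ih =>
    intro st
    simp only [List.foldl_cons,
      PySem.List.pyRange_one_eq_nil (show st.2 + a ≤ st.2 by omega), List.foldl_nil]
    exact ih _

-- ===== VERDICT =====
theorem composeM_spec : Claim_equal_composeM := by
  unfold Claim_equal_composeM
  intro h_ w a b _ hpre
  unfold Spec_composeM
  obtain ⟨p1, p2, p3⟩ := hpre
  by_cases hab : a ≠ 0 ∧ b ≠ 0
  · -- case 1
    simp only [composeM, composeM_alt, if_pos hab]
    rcases p1 hab with hh | hw | ⟨hwneg, haneg⟩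
    · simp [PySem.List.pyRange_one_eq_nil hh]
    · exact case1_main h_ w a hw
    · rw [case1_noop h_ w a haneg]
      simp [PySem.List.pyRange_one_eq_nil (show w ≤ 0 by omega)]
  · by_cases hab2 : a = 0 ∧ b ≠ 0
    · -- case 2
      simp only [composeM, composeM_alt, if_neg hab, if_pos hab2]
      by_cases hbneg : b < 0
      · rw [PySem.List.pyRange_one_eq_nil (by omega : b ≤ 0)]
        simp only [List.foldl_nil]
        apply List.map_congr_left
        intro hi hmem
        have h0 : 0 ≤ hi := (PySem.List.mem_pyRange_one.mp hmem).1
        simp [show ¬ hi < b by omega]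
      · have hbpos : 0 < b := by omega
        have hble : b ≤ h_ := by rcases p2 hab2 with h | h <;> omega
        have hstep : (PySem.List.pyRange 0 b 1).foldl
            (fun ans i => PySem.List.pySetD ans i ((PySem.List.pyRange 0 w 1).map (fun _ => (1:Int))))
            ((PySem.List.pyRange 0 h_ 1).map (fun _ => (PySem.List.pyRange 0 w 1).map (fun _ => (0:Int))))
            = rowsF (fun _ _ => (PySem.List.pyRange 0 w 1).map (fun _ => (1:Int)))
              (PySem.List.pyRange 0 b 1)
              ((PySem.List.pyRange 0 h_ 1).map (fun _ => (PySem.List.pyRange 0 w 1).map (fun _ => (0:Int)))) := rfl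
        rw [hstep, pyRangeToNat b]
        have hlen0 : ((PySem.List.pyRange 0 h_ 1).map
            (fun _ => (PySem.List.pyRange 0 w 1).map (fun _ => (0:Int)))).length = h_.toNat := by
          simp [PySem.List.length_pyRange_one]
        apply List.ext_getElem
        · rw [rowsF_length, hlen0]
          simp [PySem.List.length_pyRange_one]
        · intro k hk1 hk2
          have hkh : k < h_.toNat := by
            simp [PySem.List.length_pyRange_one] at hk2; omega
          rw [rowsF_range _ b.toNat _ (by omega) k (by omega)]
          simp only [List.getElem_map, PySem.List.getElem_pyRange_one]
          by_cases hkb : k < b.toNat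
          · rw [if_pos hkb]
            simp [show ((k:Int) < b) by omega]
          · rw [if_neg hkb]
            simp [show ¬ ((k:Int) < b) by omega, show b ≤ (k:Int) by omega]
    · by_cases hab3 : a ≠ 0 ∧ b = 0
      · -- case 3
        simp only [composeM, composeM_alt, if_neg hab, if_neg hab2, if_pos hab3]
        by_cases haneg : a < 0
        · rw [PySem.List.pyRange_one_eq_nil (by omega : a ≤ 0)]
          simp only [List.foldl_nil]
          apply List.map_congr_left
          intro hi _
          apply List.map_congr_left
          intro col hcol
          have h0 : 0 ≤ col := (PySem.List.mem_pyRange_one.mp hcol).1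
          simp [show ¬ col < a by omega]
        · by_cases hh : h_ ≤ 0
          · rw [PySem.List.pyRange_one_eq_nil hh]
            simp only [List.map_nil, List.foldl_nil, foldl_self]
          · have hapos : 0 < a := by omega
            have halew : a ≤ w := by rcases p3 hab3 with h | h | h <;> omega
            have hhpos : 0 < h_ := by omega
            have hlen0 : ((PySem.List.pyRange 0 h_ 1).map
                (fun _ => (PySem.List.pyRange 0 w 1).map (fun _ => (0:Int)))).length = h_.toNat := by
              simp [PySem.List.length_pyRange_one]
            obtain ⟨hlenC, hgetC⟩ := colsFold h_ hhpos (PySem.List.pyRange 0 a 1)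
              ((PySem.List.pyRange 0 h_ 1).map (fun _ => (PySem.List.pyRange 0 w 1).map (fun _ => (0:Int))))
              hlen0
            apply List.ext_getElem?
            intro k
            by_cases hk : k < h_.toNat
            · rw [hgetC k (by omega)]
              rw [List.getElem?_eq_getElem (by simp [PySem.List.length_pyRange_one]; omega)]
              simp only [List.getElem_map, PySem.List.getElem_pyRange_one]
              congr 1
              -- row equality
              apply List.ext_getElem
              · rw [paintR_length]; simp
              · intro j hj1 hj2
                have hja : (j : Int) < w := by
                  rw [paintR_length] at hj1
                  simp [PySem.List.length_pyRange_one] at hj1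
                  omega
                rw [paintR_getElem _ _ ?hbd j (by rw [paintR_length] at hj1; exact hj1)]
                case hbd =>
                  intro x hx
                  have := PySem.List.mem_pyRange_one.mp hx
                  refine ⟨by omega, ?_⟩
                  simp [PySem.List.length_pyRange_one]
                  omega
                rw [List.getElem_map, List.getElem_map, PySem.List.getElem_pyRange_one]
                by_cases hmem : (j : Int) ∈ PySem.List.pyRange 0 a 1
                · rw [if_pos hmem]
                  have hja2 : (j : Int) < a := (PySem.List.mem_pyRange_one.mp hmem).2
                  simp [show ((j:Int) < a) by omega]
                · rw [if_neg hmem]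
                  have hja2 : ¬ ((j : Int) < a) := fun hlt =>
                    hmem (PySem.List.mem_pyRange_one.mpr ⟨by positivity, by omega⟩)
                  simp [show ¬ ((j:Int) < a) by omega, show a ≤ (j:Int) by omega]
            · rw [List.getElem?_eq_none (by omega : _ ≤ k), List.getElem?_eq_none]
              simp [PySem.List.length_pyRange_one]
              omega
      · -- case 4: a = 0 and b = 0
        simp only [composeM, composeM_alt, if_neg hab, if_neg hab2, if_neg hab3]
        apply List.map_congr_left
        intro hi _
        simp
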